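-- pv_equiv track=rewrite | github.com/Hodobox/DM1_variant_repeat | pyth_orig/main.py | collapse_sequence
-- ===== SOURCE A (Python) =====
-- def collapse_sequence(pattern, sequence):
--     answer = []
--     repetitions = 0
--     for elem in pattern:
--         while True:
--             tried = elem * repetitions
--             if sequence[:len(tried)] != tried:
--                 answer.append(repetitions - 1)
--                 sequence = sequence[len(tried) - len(elem):]
--                 repetitions = 0
--                 break
--             repetitions += 1
--     return list(zip(answer, pattern))
-- ===== SOURCE B (Python) =====
-- def collapse_sequence(pattern, sequence):
--     out = []
--     i = 0
--     for elem in pattern: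
--         k = len(elem)
--         count = 0
--         while sequence[i:i+k] == elem:
--             count += 1
--             i += k
--         out.append((count, elem))
--     return out
-- ===== Notes on version B (the rewrite author's own statement) =====
-- stated objective: faster
-- what changed: B keeps a single pointer into the original sequence and compares one elem-length slice per repetition, instead of A's rebuilding elem*repetitions and re-comparing the whole growing prefix on every iteration.
import Mathlib
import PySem

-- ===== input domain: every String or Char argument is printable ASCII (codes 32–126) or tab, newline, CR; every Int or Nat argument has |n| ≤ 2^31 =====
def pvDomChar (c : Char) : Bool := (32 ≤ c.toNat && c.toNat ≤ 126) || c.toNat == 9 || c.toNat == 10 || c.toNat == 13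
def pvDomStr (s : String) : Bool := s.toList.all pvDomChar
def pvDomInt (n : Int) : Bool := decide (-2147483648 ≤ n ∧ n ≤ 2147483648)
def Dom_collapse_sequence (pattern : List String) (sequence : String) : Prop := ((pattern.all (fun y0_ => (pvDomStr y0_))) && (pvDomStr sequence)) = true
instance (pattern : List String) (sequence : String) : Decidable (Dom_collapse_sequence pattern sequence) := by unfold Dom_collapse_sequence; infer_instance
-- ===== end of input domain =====

-- B replaces A's quadratic rebuild-and-recompare of the whole prefix (elem*repetitions) by a
-- single pointer that compares one elem-length slice per repetition (objective: faster).

-- ===== PORT A =====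
-- A's inner `while True` loop; fuel only makes the recursion total (the loop always
-- terminates under Pre_, where every pattern element is nonempty).
def aInner (elem : List Char) (seq : List Char) (repetitions : Nat) (fuel : Nat) : Int × List Char :=
  match fuel with
  | 0 => ((repetitions : Int) - 1, seq)
  | fuel + 1 =>
    let tried := (List.replicate repetitions elem).flatten        -- elem * repetitions
    if seq.take tried.length ≠ tried then
      ((repetitions : Int) - 1, seq.drop (tried.length - elem.length))
    else
      aInner elem seq (repetitions + 1) fuel

-- A's `for elem in pattern` loop, carrying (answer, sequence)
def aFold (pattern : List String) (ans : List Int) (seq : List Char) : List Int × List Char :=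
  match pattern with
  | [] => (ans, seq)
  | e :: rest =>
    let r := aInner e.toList seq 0 (seq.length + 2)
    aFold rest (ans ++ [r.1]) r.2

def collapse_sequence (pattern : List String) (sequence : String) : List (Int × String) :=
  List.zip (aFold pattern [] sequence.toList).1 pattern           -- list(zip(answer, pattern))

-- ===== PORT B =====
-- B's inner `while sequence[i:i+k] == elem` loop; returns (count, new i); fuel for totality only.
def bRun (elem : List Char) (seq : List Char) (i : Nat) (fuel : Nat) : Nat × Nat :=
  match fuel with
  | 0 => (0, i)
  | fuel + 1 =>
    if (seq.drop i).take elem.length = elem then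
      let r := bRun elem seq (i + elem.length) fuel
      (r.1 + 1, r.2)
    else (0, i)

-- B's `for elem in pattern` loop, carrying (out, i)
def bFold (pattern : List String) (out : List (Int × String)) (seq : List Char) (i : Nat) : List (Int × String) :=
  match pattern with
  | [] => out
  | e :: rest =>
    let r := bRun e.toList seq i (seq.length + 1)
    bFold rest (out ++ [((r.1 : Int), e)]) seq r.2

def collapse_sequence_alt (pattern : List String) (sequence : String) : List (Int × String) :=
  bFold pattern [] sequence.toList 0

-- ===== PRECONDITION & SPEC =====
-- Pre_ excludes patterns containing an empty-string element: there A's (and B's) while loop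
-- never terminates (Python diverges), so A returns on exactly the inputs admitted here.
def Pre_collapse_sequence (pattern : List String) (sequence : String) : Prop :=
  ∀ e ∈ pattern, e ≠ ""
instance (pattern : List String) (sequence : String) : Decidable (Pre_collapse_sequence pattern sequence) := by unfold Pre_collapse_sequence; infer_instance

def pvWitness_collapse_sequence : List String × String := (["ab", "c"], "ababc")

def Spec_collapse_sequence (pattern : List String) (sequence : String) (out : List (Int × String)) : Prop := out = collapse_sequence_alt pattern sequence
instance (pattern : List String) (sequence : String) (out : List (Int × String)) : Decidable (Spec_collapse_sequence pattern sequence out) := by unfold Spec_collapse_sequence; infer_instance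

-- ===== CLAIM (what is proved, stated in full; the proofs are below) =====
def Claim_equal_collapse_sequence : Prop := ∀ (pattern : List String) (sequence : String), Dom_collapse_sequence pattern sequence → Pre_collapse_sequence pattern sequence → Spec_collapse_sequence pattern sequence (collapse_sequence pattern sequence)

-- ===== LEMMAS AND PROOFS =====

-- the common repetition count: how many consecutive copies of `elem` prefix `seq`
def cnt (elem : List Char) (seq : List Char) : Nat :=
  if h : elem ≠ [] ∧ seq.take elem.length = elem then
    1 + cnt elem (seq.drop elem.length)
  else 0
termination_by seq.length
decreasing_by
  have hk : 0 < elem.length := List.length_pos_iff.mpr h.1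
  have hlen : elem.length ≤ seq.length := by
    have := congrArg List.length h.2
    simp [List.length_take] at this
    omega
  simp [List.length_drop]; omega

lemma cnt_pos (elem seq : List Char) (he : elem ≠ []) (h : seq.take elem.length = elem) :
    cnt elem seq = 1 + cnt elem (seq.drop elem.length) := by
  rw [cnt]; rw [dif_pos ⟨he, h⟩]

lemma cnt_zero (elem seq : List Char) (h : seq.take elem.length ≠ elem) :
    cnt elem seq = 0 := by
  rw [cnt]; rw [dif_neg (by tauto)]

lemma take_len_le {seq elem : List Char} {n : Nat} (h : seq.take n = elem)
    (hn : elem.length = n) : n ≤ seq.length := by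
  have := congrArg List.length h
  simp [List.length_take] at this
  omega

-- B1: bRun computes cnt and advances the pointer by cnt * len(elem)
lemma bRun_eq (elem seq : List Char) (he : elem ≠ []) :
    ∀ fuel i, seq.length - i + 1 ≤ fuel →
    bRun elem seq i fuel =
      (cnt elem (seq.drop i), i + cnt elem (seq.drop i) * elem.length) := by
  intro fuel
  induction fuel with
  | zero => intro i h; omega
  | succ f ih =>
    intro i hfuel
    have hk : 0 < elem.length := List.length_pos_iff.mpr he
    by_cases h : (seq.drop i).take elem.length = elem
    · have hle : elem.length ≤ seq.length - i := by
        have := take_len_le h rfl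
        simpa [List.length_drop] using this
      have hrec := ih (i + elem.length) (by omega)
      rw [cnt_pos elem _ he h]
      simp only [bRun, if_pos h, hrec, List.drop_drop, Prod.mk.injEq]
      constructor
      · omega
      · ring
    · rw [cnt_zero elem _ h]
      simp [bRun, h]

lemma flatten_replicate_len (n : Nat) (elem : List Char) :
    (List.replicate n elem).flatten.length = n * elem.length := by simp

-- prefix extension: given rep copies already match, rep+1 copies match iff the next slice is elem
lemma prefix_step (elem seq : List Char) (rep : Nat)
    (H : seq.take (rep * elem.length) = (List.replicate rep elem).flatten) :
    (seq.take ((rep + 1) * elem.length) = (List.replicate (rep + 1) elem).flatten ↔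
      (seq.drop (rep * elem.length)).take elem.length = elem) := by
  have h1 : (List.replicate (rep + 1) elem).flatten
      = (List.replicate rep elem).flatten ++ elem := by
    rw [List.replicate_succ']; simp
  have h2 : seq.take ((rep + 1) * elem.length)
      = seq.take (rep * elem.length) ++ (seq.drop (rep * elem.length)).take elem.length := by
    rw [Nat.succ_mul]; exact List.take_add ..
  rw [h1, h2, H]
  simp

-- A1: aInner, started from a matching repetition count, returns rep + cnt and drops the matched prefix
lemma aInner_eq (elem seq : List Char) (he : elem ≠ []) :
    ∀ fuel rep, seq.take (rep * elem.length) = (List.replicate rep elem).flatten →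
    seq.length + 2 ≤ fuel + rep →
    aInner elem seq rep fuel =
      ((rep : Int) + cnt elem (seq.drop (rep * elem.length)),
        seq.drop ((rep + cnt elem (seq.drop (rep * elem.length))) * elem.length)) := by
  intro fuel
  induction fuel with
  | zero =>
    intro rep H hfuel
    have hk : 0 < elem.length := List.length_pos_iff.mpr he
    have h1 : rep * elem.length ≤ seq.length := take_len_le H (flatten_replicate_len ..)
    have : rep ≤ rep * elem.length := Nat.le_mul_of_pos_right _ hk
    omega
  | succ f ih =>
    intro rep H hfuel
    have hk : 0 < elem.length := List.length_pos_iff.mpr he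
    have hlen : rep * elem.length ≤ seq.length := take_len_le H (flatten_replicate_len ..)
    have hrep : rep ≤ rep * elem.length := Nat.le_mul_of_pos_right _ hk
    have step1 : aInner elem seq rep (f + 1) = aInner elem seq (rep + 1) f := by
      simp only [aInner, flatten_replicate_len]
      rw [if_neg (by simp [H])]
    by_cases h : (seq.drop (rep * elem.length)).take elem.length = elem
    · have H' := (prefix_step elem seq rep H).mpr h
      have hrec := ih (rep + 1) H' (by omega)
      rw [step1, hrec, cnt_pos elem _ he h, List.drop_drop]
      have harg : rep * elem.length + elem.length = (rep + 1) * elem.length := by ring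
      rw [harg]
      simp only [Prod.mk.injEq]
      constructor
      · push_cast; ring
      · congr 1; ring
    · -- the (rep+1)-st try fails: A breaks at repetitions = rep+1
      have H' : seq.take ((rep + 1) * elem.length) ≠ (List.replicate (rep + 1) elem).flatten :=
        fun hc => h ((prefix_step elem seq rep H).mp hc)
      obtain ⟨f', rfl⟩ : ∃ f', f = f' + 1 := ⟨f - 1, by omega⟩
      rw [step1]
      simp only [aInner, flatten_replicate_len]
      rw [if_pos (by simpa using H'), cnt_zero elem _ h]
      have harg : (rep + 1) * elem.length - elem.length = rep * elem.length := by
        rw [Nat.succ_mul]; omega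
      rw [harg]
      simp only [Prod.mk.injEq]
      constructor
      · push_cast; ring
      · norm_num

-- the list of repetition counts, one per pattern element, from pointer i
def counts (seq : List Char) : List String → Nat → List Int
  | [], _ => []
  | e :: rest, i =>
    let c := cnt e.toList (seq.drop i)
    (c : Int) :: counts seq rest (i + c * e.toList.length)

lemma aFold_eq (seq : List Char) :
    ∀ pattern ans i, (∀ e ∈ pattern, e.toList ≠ []) →
    (aFold pattern ans (seq.drop i)).1 = ans ++ counts seq pattern i := by
  intro pattern
  induction pattern with
  | nil => intro ans i _; simp [aFold, counts]
  | cons e rest ih =>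
    intro ans i hne
    have he : e.toList ≠ [] := hne e (by simp)
    have hstep := aInner_eq e.toList (seq.drop i) he ((seq.drop i).length + 2) 0
      (by simp) (by omega)
    simp only [aFold, hstep, Nat.zero_add, Nat.add_zero, List.drop_drop, Nat.zero_mul,
      Int.natCast_zero, Int.zero_add]
    rw [ih (ans ++ [(cnt e.toList (seq.drop i) : Int)]) (i + cnt e.toList (seq.drop i) * e.toList.length)
      (fun x hx => hne x (by simp [hx]))]
    simp [counts]

lemma bFold_eq (seq : List Char) :
    ∀ pattern out i, (∀ e ∈ pattern, e.toList ≠ []) →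
    bFold pattern out seq i = out ++ List.zip (counts seq pattern i) pattern := by
  intro pattern
  induction pattern with
  | nil => intro out i _; simp [bFold, counts]
  | cons e rest ih =>
    intro out i hne
    have he : e.toList ≠ [] := hne e (by simp)
    have hstep := bRun_eq e.toList seq he (seq.length + 1) i (by omega)
    simp only [bFold, hstep]
    rw [ih (out ++ [((cnt e.toList (seq.drop i) : Int), e)]) (i + cnt e.toList (seq.drop i) * e.toList.length)
      (fun x hx => hne x (by simp [hx]))]
    simp [counts, List.zip]

lemma toList_ne_nil {e : String} (h : e ≠ "") : e.toList ≠ [] := by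
  intro hc
  exact h (by simp_all)

-- ===== VERDICT (by name: the statement is the Claim_ definition above) =====
theorem collapse_sequence_spec : Claim_equal_collapse_sequence := by
  intro pattern sequence _ hpre
  unfold Spec_collapse_sequence collapse_sequence collapse_sequence_alt
  have hne : ∀ e ∈ pattern, e.toList ≠ [] := fun e he => toList_ne_nil (hpre e he)
  have hA := aFold_eq sequence.toList pattern [] 0 hne
  have hB := bFold_eq sequence.toList pattern [] 0 hne
  rw [List.drop_zero] at hA
  rw [hA, hB]
  simp
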